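-- pv_equiv track=rewrite | github.com/jwdj/EasyABC | not used/xml2abc_nils.py | get_accidentals
-- ===== SOURCE A (Python) =====
-- steps = 'C D E F G A B'.split()
--
-- def get_accidentals(fifths):
--     # determine the accidentals for one octave
--     one_octave = [0] * 7
--     if fifths > 0:
--         for i in range(fifths):
--             one_octave[(3 + i*4) % 7] = 1
--     else:
--         for i in range(fifths+1, 1):
--             one_octave[(6 + i*4) % 7] = -1
--
--     # use the same for all octaves
--     accidentals = {}
--     for octave in range(1, 7):
--         for step in range(7):
--             note = '%s%s' % (steps[step], octave)  # eg. G4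
--             accidentals[note] = one_octave[step]
--     return accidentals
-- ===== SOURCE B (Python) =====
-- # B: no modular arithmetic -- the circle-of-fifths orders are literal tables:
-- # a key with f sharps alters the first f letters of 'FCGDAEB', a key with f
-- # flats the first f letters of 'BEADGCF'; string slicing clamps automatically.
-- SHARPS = 'FCGDAEB'
-- FLATS = 'BEADGCF'
--
-- def get_accidentals(fifths):
--     if fifths > 0:
--         names, value = SHARPS[:fifths], 1
--     else:
--         names, value = FLATS[:-fifths], -1
--     accidentals = {}
--     for octave in range(1, 7):
--         for s in 'CDEFGAB':
--             accidentals['%s%s' % (s, octave)] = value if s in names else 0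
--     return accidentals
-- ===== Notes on version B (the rewrite author's own statement) =====
-- stated objective: faster
-- what changed: B drops A's modular index arithmetic ((3+i*4)%7 / (6+i*4)%7) and the per-octave accidental array entirely: it uses the literal circle-of-fifths letter tables 'FCGDAEB' and 'BEADGCF', slices off the first |fifths| letters (string slicing clamps, matching A's saturation), and assigns each note the signature value iff its letter is in that prefix, so the work is independent of |fifths|.
import Mathlib
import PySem

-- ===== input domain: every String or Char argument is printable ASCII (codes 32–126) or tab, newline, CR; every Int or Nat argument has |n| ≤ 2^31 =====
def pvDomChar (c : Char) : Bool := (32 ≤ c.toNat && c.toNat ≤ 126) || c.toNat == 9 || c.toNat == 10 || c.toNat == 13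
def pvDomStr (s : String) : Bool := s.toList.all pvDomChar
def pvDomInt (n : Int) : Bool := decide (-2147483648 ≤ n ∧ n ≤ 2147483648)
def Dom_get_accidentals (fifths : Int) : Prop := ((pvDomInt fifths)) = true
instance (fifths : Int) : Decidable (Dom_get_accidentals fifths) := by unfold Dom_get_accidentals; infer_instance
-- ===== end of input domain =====

-- B replaces A's modular index arithmetic and accidental array by literal
-- circle-of-fifths tables ('FCGDAEB' / 'BEADGCF') sliced by fifths, testing
-- each note letter for membership in the sliced prefix.

-- ===== PORT A =====
-- module constant: steps = 'C D E F G A B'.split()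
def pvSteps : List String := PySem.Str.split₀ "C D E F G A B"

-- A's second loop: accidentals[steps[step] + str(octave)] = one_octave[step] for all octaves
def pvFillA (one_octave : List Int) : PySem.Dict String Int :=
  (PySem.List.pyRange 1 7 1).foldl (fun acc octave =>
    (PySem.List.pyRange 0 7 1).foldl (fun acc step =>
      acc.insert (PySem.List.pyGetD pvSteps step "" ++ PySem.Int.toStr octave)
        (PySem.List.pyGetD one_octave step 0)) acc) PySem.Dict.empty

def get_accidentals (fifths : Int) : List (String × Int) :=
  (pvFillA
    (if fifths > 0 then
      (PySem.List.pyRange 0 fifths 1).foldl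
        (fun oct i => PySem.List.pySetD oct (PySem.Int.mod (3 + i * 4) 7) 1)
        (List.replicate 7 0)
     else
      (PySem.List.pyRange (fifths + 1) 1 1).foldl
        (fun oct i => PySem.List.pySetD oct (PySem.Int.mod (6 + i * 4) 7) (-1))
        (List.replicate 7 0))).items

-- ===== PORT B =====
-- B's loop: for each octave and letter, value if the letter is in names else 0
def pvFillB (names : String) (value : Int) : List (String × Int) :=
  ((PySem.List.pyRange 1 7 1).foldl (fun acc octave =>
    ("CDEFGAB".toList).foldl (fun acc s =>
      acc.insert (String.mk [s] ++ PySem.Int.toStr octave)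
        (if PySem.Str.isIn (String.mk [s]) names then value else 0)) acc)
    PySem.Dict.empty).items

def get_accidentals_alt (fifths : Int) : List (String × Int) :=
  if fifths > 0 then
    pvFillB (PySem.Str.slice "FCGDAEB" none (some fifths)) 1
  else
    pvFillB (PySem.Str.slice "BEADGCF" none (some (-fifths))) (-1)

-- ===== PRECONDITION & SPEC =====
def Spec_get_accidentals (fifths : Int) (out : List (String × Int)) : Prop := out = get_accidentals_alt fifths
instance (fifths : Int) (out : List (String × Int)) : Decidable (Spec_get_accidentals fifths out) := by unfold Spec_get_accidentals; infer_instance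

-- ===== CLAIM (what is proved, stated in full; the proofs are below) =====
def Claim_equal_get_accidentals : Prop := ∀ (fifths : Int), Dom_get_accidentals fifths → Spec_get_accidentals fifths (get_accidentals fifths)

-- ===== LEMMAS AND PROOFS =====

-- sharps: once every step is 1, a further write of 1 changes nothing
lemma pvA_pos_fix (i : Int) :
    PySem.List.pySetD ([1, 1, 1, 1, 1, 1, 1] : List Int) (PySem.Int.mod (3 + i * 4) 7) 1
      = [1, 1, 1, 1, 1, 1, 1] := by
  have h0 : 0 ≤ PySem.Int.mod (3 + i * 4) 7 := PySem.Int.mod_nonneg _ (by norm_num)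
  have h7 : PySem.Int.mod (3 + i * 4) 7 < 7 := PySem.Int.mod_lt _ (by norm_num)
  generalize PySem.Int.mod (3 + i * 4) 7 = m at h0 h7 ⊢
  interval_cases m <;> decide

-- A saturates for fifths ≥ 7
lemma pvA_pos (f : Int) (hf : 7 ≤ f) : get_accidentals f = get_accidentals 7 := by
  unfold get_accidentals
  rw [if_pos (by omega : f > 0), if_pos (by norm_num : (7:Int) > 0)]
  rw [PySem.List.pyRange_one_append 0 7 f (by norm_num) hf, List.foldl_append]
  rw [show (PySem.List.pyRange 0 7 1).foldl
        (fun oct i => PySem.List.pySetD oct (PySem.Int.mod (3 + i * 4) 7) 1)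
        (List.replicate 7 (0 : Int)) = [1, 1, 1, 1, 1, 1, 1] from by decide]
  rw [List.foldl_fixed' pvA_pos_fix]

-- the flats loop preserves the length of one_octave
lemma pvA_neg_len (l : List Int) (init : List Int) :
    (l.foldl (fun oct i => PySem.List.pySetD oct (PySem.Int.mod (6 + i * 4) 7) (-1)) init).length
      = init.length := by
  induction l generalizing init with
  | nil => rfl
  | cons x xs ih => rw [List.foldl_cons, ih, PySem.List.length_pySetD]

-- the last seven flat writes (i = -6..0) hit every step, whatever came before
lemma pvA_neg_sat (init : List Int) (h : init.length = 7) :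
    (PySem.List.pyRange (-6) 1 1).foldl
      (fun oct i => PySem.List.pySetD oct (PySem.Int.mod (6 + i * 4) 7) (-1)) init
      = [-1, -1, -1, -1, -1, -1, -1] := by
  obtain ⟨a, b, c, d, e, x, g, hinit⟩ :
      ∃ a b c d e x g, init = ([a, b, c, d, e, x, g] : List Int) := by
    rcases init with _ | ⟨a, _ | ⟨b, _ | ⟨c, _ | ⟨d, _ | ⟨e, _ | ⟨x, _ | ⟨g, _ | ⟨h8, t⟩⟩⟩⟩⟩⟩⟩⟩ <;>
      first
        | exact ⟨a, b, c, d, e, x, g, rfl⟩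
        | simp at h
  subst hinit
  rw [show PySem.List.pyRange (-6) 1 1 = [-6, -5, -4, -3, -2, -1, 0] from by decide]
  simp only [List.foldl]
  rw [show PySem.Int.mod (6 + (-6) * 4) 7 = 3 from by decide,
      show PySem.Int.mod (6 + (-5) * 4) 7 = 0 from by decide,
      show PySem.Int.mod (6 + (-4) * 4) 7 = 4 from by decide,
      show PySem.Int.mod (6 + (-3) * 4) 7 = 1 from by decide,
      show PySem.Int.mod (6 + (-2) * 4) 7 = 5 from by decide,
      show PySem.Int.mod (6 + (-1) * 4) 7 = 2 from by decide,
      show PySem.Int.mod (6 + 0 * 4) 7 = 6 from by decide]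
  simp [PySem.List.pySetD_of_nonneg, List.set]

-- A saturates for fifths ≤ -7
lemma pvA_neg (f : Int) (hf : f ≤ -7) : get_accidentals f = get_accidentals (-7) := by
  unfold get_accidentals
  rw [if_neg (by omega : ¬ f > 0), if_neg (by norm_num : ¬ (-7:Int) > 0)]
  rw [PySem.List.pyRange_one_append (f + 1) (-6) 1 (by omega) (by norm_num), List.foldl_append]
  rw [pvA_neg_sat _ (by rw [pvA_neg_len]; simp),
      show ((-7:Int) + 1) = -6 from by norm_num,
      pvA_neg_sat _ (by simp)]

-- B's slices clamp: a seven-letter table is exhausted after seven accidentals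
lemma pvB_slice_sat (t : String) (ht : t.toList.length = 7) (f : Int) (hf : 7 ≤ f) :
    PySem.Str.slice t none (some f) = PySem.Str.slice t none (some 7) := by
  simp [PySem.Str.slice]
  rw [PySem.List.slice_to _ (by omega), PySem.List.slice_to _ (by omega)]
  rw [List.take_of_length_le (by omega), List.take_of_length_le (by omega)]

lemma pvB_pos (f : Int) (hf : 7 ≤ f) : get_accidentals_alt f = get_accidentals_alt 7 := by
  unfold get_accidentals_alt
  rw [if_pos (by omega : f > 0), if_pos (by norm_num : (7:Int) > 0),
      pvB_slice_sat _ (by decide) f hf]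

lemma pvB_neg (f : Int) (hf : f ≤ -7) : get_accidentals_alt f = get_accidentals_alt (-7) := by
  unfold get_accidentals_alt
  rw [if_neg (by omega : ¬ f > 0), if_neg (by norm_num : ¬ (-7:Int) > 0),
      pvB_slice_sat _ (by decide) (-f) (by omega),
      show (-(-7:Int)) = 7 from by norm_num]

-- A = B for every fifths in [-7, 7], by evaluation
set_option maxRecDepth 40000 in
lemma pvAB_small (f : Int) (h1 : -7 ≤ f) (h2 : f ≤ 7) :
    get_accidentals f = get_accidentals_alt f := by
  interval_cases f <;> decide

-- ===== VERDICT (by name: the statement is the Claim_ definition above) =====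
theorem get_accidentals_spec : Claim_equal_get_accidentals := by
  intro f _
  unfold Spec_get_accidentals
  by_cases h1 : f ≤ -7
  · rw [pvA_neg f h1, pvB_neg f h1]
    exact pvAB_small (-7) (by norm_num) (by norm_num)
  · by_cases h2 : 7 ≤ f
    · rw [pvA_pos f h2, pvB_pos f h2]
      exact pvAB_small 7 (by norm_num) (by norm_num)
    · exact pvAB_small f (by omega) (by omega)
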